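-- pv_equiv track=rewrite | github.com/Noahnrg/All-Scores | Final_Project.py | getTeam
-- ===== SOURCE A (Python) =====
-- def getTeam(stringInput):
--     searchList = stripAndSplit(stringInput," ")
-- #Eastern Conference
--     MLS_EC = [["Chicago Fire","chicago","fire"],
-- ["Columbus Crew SC","columbus","crew"],
-- ["DC United","dc","united"],
-- ["Montreal Impact","montreal","impact"],
-- ["New England Revolution","england","revolution"],
-- ["New York City FC","city"],
-- ["New York Red Bulls","red","bulls"],
-- ["Orlando City SC","orlando"],
-- ["Philadelphia Union","philadelhia","union"],
-- ["Toronto FC","toronto"]]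
-- #Western Conference
--     MLS_WC = [["Colorado Rapids","colorado","rapids"],
-- ["Houston Dynamo","houston","dynamo"],
-- ["LA Galaxy","la","galaxy"],
-- ["FC Dallas","dallas"],
-- ["Portland Timbers","portland","timbers"],
-- ["Real Salt Lake","salt","lake"],
-- ["San Jose Earthquakes","san","jose","earthquakes"],
-- ["Seattle Sounders FC","seattle","sounders"],
-- ["Sporting Kansas City","sporting","kansas"],
-- ["Vancouver Whitecaps FC","vancouver","whitecaps"]]
--     for searchRequest in searchList:
--         for x in range(0,len(MLS_WC)):
--             if searchRequest in MLS_WC[x]: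
--                 return MLS_WC[x][0]
--         for x in range(0,len(MLS_EC)):
--             if searchRequest in MLS_EC[x]:
--                 return MLS_EC[x][0]
--     else:
--         return ""
--
-- def stripAndSplit(string,splitByThis):
--     return string.strip().split(splitByThis)
-- ===== SOURCE B (Python) =====
-- # Inverted iteration: instead of scanning the tables for each input word with an
-- # early return, scan each table row ONCE, compute the earliest position in the
-- # input where the row matches, and keep the row with the smallest position
-- # (rows listed in A's priority order WC-then-EC break position ties).
-- MLS = [["Colorado Rapids","colorado","rapids"],
--        ["Houston Dynamo","houston","dynamo"],
--        ["LA Galaxy","la","galaxy"],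
--        ["FC Dallas","dallas"],
--        ["Portland Timbers","portland","timbers"],
--        ["Real Salt Lake","salt","lake"],
--        ["San Jose Earthquakes","san","jose","earthquakes"],
--        ["Seattle Sounders FC","seattle","sounders"],
--        ["Sporting Kansas City","sporting","kansas"],
--        ["Vancouver Whitecaps FC","vancouver","whitecaps"],
--        ["Chicago Fire","chicago","fire"],
--        ["Columbus Crew SC","columbus","crew"],
--        ["DC United","dc","united"],
--        ["Montreal Impact","montreal","impact"],
--        ["New England Revolution","england","revolution"],
--        ["New York City FC","city"],
--        ["New York Red Bulls","red","bulls"],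
--        ["Orlando City SC","orlando"],
--        ["Philadelphia Union","philadelhia","union"],
--        ["Toronto FC","toronto"]]
--
-- def getTeam(stringInput):
--     words = stringInput.strip().split(" ")
--     best_i = len(words)
--     best = ""
--     for row in MLS:
--         hits = [words.index(k) for k in row if k in words]
--         i = min(hits) if hits else len(words)
--         if i < best_i:
--             best_i, best = i, row[0]
--     return best
-- ===== Notes on version B (the rewrite author's own statement) =====
-- stated objective: alternative
-- what changed: Inverts A's loop nesting: instead of iterating over input words and scanning both tables with an early return, B makes one pass over a merged row table, computes for each row the earliest input position matching it, and keeps the row with the smallest position (table order breaks ties), so there is no early return and no per-word table scan.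
import Mathlib
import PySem

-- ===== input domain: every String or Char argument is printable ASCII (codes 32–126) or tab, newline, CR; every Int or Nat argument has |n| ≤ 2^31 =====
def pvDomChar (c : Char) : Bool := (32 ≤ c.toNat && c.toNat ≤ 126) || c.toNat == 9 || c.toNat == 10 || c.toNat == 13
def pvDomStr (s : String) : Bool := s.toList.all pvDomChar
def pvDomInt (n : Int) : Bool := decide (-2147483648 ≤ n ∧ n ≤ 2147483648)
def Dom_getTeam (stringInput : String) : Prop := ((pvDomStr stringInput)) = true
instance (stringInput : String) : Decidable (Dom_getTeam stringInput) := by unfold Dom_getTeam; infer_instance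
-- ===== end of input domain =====

-- B inverts A's loop nesting: one pass over a merged row table keeping the row with the
-- earliest matching input position, instead of per-word table scans with early return.

-- ===== PORT A =====

def pvMLS_EC : List (List String) :=
  [["Chicago Fire","chicago","fire"],
   ["Columbus Crew SC","columbus","crew"],
   ["DC United","dc","united"],
   ["Montreal Impact","montreal","impact"],
   ["New England Revolution","england","revolution"],
   ["New York City FC","city"],
   ["New York Red Bulls","red","bulls"],
   ["Orlando City SC","orlando"],
   ["Philadelphia Union","philadelhia","union"],
   ["Toronto FC","toronto"]]

def pvMLS_WC : List (List String) :=
  [["Colorado Rapids","colorado","rapids"],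
   ["Houston Dynamo","houston","dynamo"],
   ["LA Galaxy","la","galaxy"],
   ["FC Dallas","dallas"],
   ["Portland Timbers","portland","timbers"],
   ["Real Salt Lake","salt","lake"],
   ["San Jose Earthquakes","san","jose","earthquakes"],
   ["Seattle Sounders FC","seattle","sounders"],
   ["Sporting Kansas City","sporting","kansas"],
   ["Vancouver Whitecaps FC","vancouver","whitecaps"]]

-- inner 'for x in range(0,len(table)): if searchRequest in table[x]: return table[x][0]'
def pvScanRows (rows : List (List String)) (w : String) : Option String :=
  match rows with
  | [] => none
  | r :: rs => if r.contains w then some (r.headD "") else pvScanRows rs w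

-- outer 'for searchRequest in searchList: …' with early return
def pvLoopA (searchList : List String) : String :=
  match searchList with
  | [] => ""
  | w :: rest =>
    match pvScanRows pvMLS_WC w with
    | some t => t
    | none =>
      match pvScanRows pvMLS_EC w with
      | some t => t
      | none => pvLoopA rest

def getTeam (stringInput : String) : String :=
  let searchList := (PySem.Str.split? (PySem.Str.strip stringInput) " ").getD []
  pvLoopA searchList

-- ===== PORT B =====

-- the merged table MLS (WC rows then EC rows), written out as in Source B
def pvMLS : List (List String) :=
  [["Colorado Rapids","colorado","rapids"],
   ["Houston Dynamo","houston","dynamo"],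
   ["LA Galaxy","la","galaxy"],
   ["FC Dallas","dallas"],
   ["Portland Timbers","portland","timbers"],
   ["Real Salt Lake","salt","lake"],
   ["San Jose Earthquakes","san","jose","earthquakes"],
   ["Seattle Sounders FC","seattle","sounders"],
   ["Sporting Kansas City","sporting","kansas"],
   ["Vancouver Whitecaps FC","vancouver","whitecaps"],
   ["Chicago Fire","chicago","fire"],
   ["Columbus Crew SC","columbus","crew"],
   ["DC United","dc","united"],
   ["Montreal Impact","montreal","impact"],
   ["New England Revolution","england","revolution"],
   ["New York City FC","city"],
   ["New York Red Bulls","red","bulls"],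
   ["Orlando City SC","orlando"],
   ["Philadelphia Union","philadelhia","union"],
   ["Toronto FC","toronto"]]

-- 'hits = [words.index(k) for k in row if k in words]; i = min(hits) if hits else len(words)'
def pvRowPos (words : List String) (row : List String) : Nat :=
  match PySem.List.min? (row.filterMap (fun k => PySem.List.index? words k)) (fun x => x) with
  | some m => m
  | none => words.length

-- loop body: 'if i < best_i: best_i, best = i, row[0]'
def pvStep (words : List String) (best : Nat × String) (row : List String) : Nat × String :=
  if pvRowPos words row < best.1 then (pvRowPos words row, row.headD "") else best

def getTeam_alt (stringInput : String) : String :=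
  let words := (PySem.Str.split? (PySem.Str.strip stringInput) " ").getD []
  (pvMLS.foldl (pvStep words) (words.length, "")).2

-- ===== PRECONDITION & SPEC =====
def Spec_getTeam (stringInput : String) (out : String) : Prop := out = getTeam_alt stringInput
instance (stringInput : String) (out : String) : Decidable (Spec_getTeam stringInput out) := by unfold Spec_getTeam; infer_instance

-- ===== CLAIM =====
def Claim_equal_getTeam : Prop := ∀ (stringInput : String), Dom_getTeam stringInput → Spec_getTeam stringInput (getTeam stringInput)

-- ===== LEMMAS AND PROOFS =====

-- once the best position hits 0 the fold never changes it
theorem pv_fold_zero (rows : List (List String)) (ws : List String) (s : String) :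
    List.foldl (pvStep ws) (0, s) rows = (0, s) := by
  induction rows with
  | nil => rfl
  | cons r rs ih => simp [pvStep, ih]

-- running minimum over the same values all shifted by +1
theorem pv_foldl_min_shift (t : List Nat) (x : Nat) :
    (t.map (· + 1)).foldl min (x + 1) = (t.foldl min x) + 1 := by
  induction t generalizing x with
  | nil => rfl
  | cons a s ih =>
    have h : min (x + 1) (a + 1) = min x a + 1 := by omega
    simp only [List.map_cons, List.foldl_cons, h, ih]

theorem pv_min?_shift (l : List Nat) :
    PySem.List.min? (l.map (· + 1)) (fun x => x)
      = (PySem.List.min? l (fun x => x)).map (· + 1) := by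
  cases l with
  | nil => rfl
  | cons x t =>
    rw [List.map_cons, PySem.List.min?_id_cons, PySem.List.min?_id_cons]
    simp only [Option.map_some]
    exact congrArg some (pv_foldl_min_shift t x)

-- a row containing the first word matches at position 0
theorem pv_rowPos_mem (w : String) (rest row : List String) (hw : w ∈ row) :
    pvRowPos (w :: rest) row = 0 := by
  have h0 : (0 : Nat) ∈ row.filterMap (fun k => PySem.List.index? (w :: rest) k) :=
    List.mem_filterMap.2 ⟨w, hw, PySem.List.index?_cons_self w rest⟩
  unfold pvRowPos
  rcases h : PySem.List.min? (row.filterMap (fun k => PySem.List.index? (w :: rest) k))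
      (fun x => x) with _ | m
  · rw [(PySem.List.min?_eq_none_iff _ _).1 h] at h0
    exact absurd h0 (List.not_mem_nil)
  · have hm := PySem.List.min?_isMin h 0 h0
    show m = 0
    omega

-- a row not containing the first word matches one position later than in the tail
theorem pv_rowPos_not (w : String) (rest row : List String) (hw : w ∉ row) :
    pvRowPos (w :: rest) row = pvRowPos rest row + 1 := by
  have hshift : row.filterMap (fun k => PySem.List.index? (w :: rest) k)
      = (row.filterMap (fun k => PySem.List.index? rest k)).map (· + 1) := by
    rw [List.map_filterMap]
    refine List.filterMap_congr ?_
    intro k hk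
    exact PySem.List.index?_cons_of_ne rest (fun e => hw (e ▸ hk))
  simp only [pvRowPos, hshift, pv_min?_shift]
  rcases PySem.List.min? (row.filterMap (fun k => PySem.List.index? rest k))
      (fun x => x) with _ | m <;> simp

-- one step of the word list peeled off the best-row fold
theorem pv_fold_cons (rows : List (List String)) (w : String) (rest : List String)
    (m : Nat) (s : String) :
    List.foldl (pvStep (w :: rest)) (m + 1, s) rows
      = match pvScanRows rows w with
        | some t => (0, t)
        | none => ((List.foldl (pvStep rest) (m, s) rows).1 + 1,
                   (List.foldl (pvStep rest) (m, s) rows).2) := by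
  induction rows generalizing m s with
  | nil => rfl
  | cons r rs ih =>
    by_cases hw : w ∈ r
    · have hb : r.contains w = true := by simpa using hw
      simp only [pvScanRows, hb, if_true, List.foldl_cons, pvStep,
        pv_rowPos_mem w rest r hw]
      rw [if_pos (Nat.succ_pos m)]
      exact pv_fold_zero rs (w :: rest) _
    · have hb : r.contains w = false := by simpa using hw
      simp only [pvScanRows, hb, Bool.false_eq_true, if_false, List.foldl_cons, pvStep,
        pv_rowPos_not w rest r hw]
      by_cases hlt : pvRowPos rest r < m
      · have hlt' : pvRowPos rest r + 1 < m + 1 := by omega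
        simp only [hlt, hlt', if_true]
        exact ih (pvRowPos rest r) (r.headD "")
      · have hlt' : ¬ (pvRowPos rest r + 1 < m + 1) := by omega
        simp only [hlt, hlt', if_false]
        exact ih m s

-- scanning an appended table = scan the first, then the second
theorem pv_scan_append (t1 t2 : List (List String)) (w : String) :
    pvScanRows (t1 ++ t2) w = (pvScanRows t1 w).or (pvScanRows t2 w) := by
  induction t1 with
  | nil => simp [pvScanRows]
  | cons r rs ih => simp only [List.cons_append, pvScanRows, ih]; split <;> simp

-- the two loops agree on every word list
theorem pv_loops_eq (ws : List String) :
    pvLoopA ws = (List.foldl (pvStep ws) (ws.length, "") pvMLS).2 := by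
  induction ws with
  | nil => simp [pvLoopA, pv_fold_zero]
  | cons w rest ih =>
    have hsplit : pvMLS = pvMLS_WC ++ pvMLS_EC := by rfl
    rw [show (w :: rest).length = rest.length + 1 from rfl,
        pv_fold_cons pvMLS w rest rest.length "", hsplit, pv_scan_append]
    simp only [pvLoopA]
    cases hwc : pvScanRows pvMLS_WC w <;> cases hec : pvScanRows pvMLS_EC w <;>
      simp [Option.or, ih, ← hsplit]

-- ===== VERDICT =====
theorem getTeam_spec : Claim_equal_getTeam := by
  intro s _
  unfold Spec_getTeam getTeam getTeam_alt
  exact pv_loops_eq _
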